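-- pv_equiv track=rewrite | github.com/HAckeRSHIL/cmpe273-codes | merkle_tree.py | find_disperancy
-- ===== SOURCE A (Python) =====
-- from collections import deque
--
-- def find_disperancy(tree1, tree2):
--     tree1.reverse()
--     tree2.reverse()
--     q = deque()
--     q.append((0, 0))
--     while q:
--         l = len(q)
--         for _ in range(l):
--             level, index = q.popleft()
--             if tree1[level][index] != tree2[level][index]:
--                 q.append((level + 1, index * 2))
--                 q.append((level + 1, index * 2 + 1))
--         # if we are at the last level, then we are done
--         if level + 1 == len(tree1) - 1:
--             break
--
--     ans = []
--     for level, index in q: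
--         if tree1[level][index] != tree2[level][index]:
--             ans.append((level, index))
--
--     return ans
-- ===== SOURCE B (Python) =====
-- def find_disperancy(tree1, tree2):
--     # Same in-place reversal of both arguments as the original.
--     tree1.reverse()
--     tree2.reverse()
--     n = len(tree1)
--     ans = []
--
--     def dfs(level, index):
--         if tree1[level][index] != tree2[level][index]:
--             if level + 2 == n:
--                 # children are the leaf level: report the differing ones
--                 for child in (index * 2, index * 2 + 1):
--                     if tree1[level + 1][child] != tree2[level + 1][child]:
--                         ans.append((level + 1, child))
--             else:
--                 dfs(level + 1, index * 2)
--                 dfs(level + 1, index * 2 + 1)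
--
--     dfs(0, 0)
--     return ans
-- ===== Notes on version B (the rewrite author's own statement) =====
-- stated objective: alternative
-- what changed: Replaces the deque-based level-order BFS (process a whole level per while-iteration, then filter the leftover queue) with a recursive depth-first traversal from the root that appends differing leaf children directly at the boundary level.
import Mathlib
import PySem

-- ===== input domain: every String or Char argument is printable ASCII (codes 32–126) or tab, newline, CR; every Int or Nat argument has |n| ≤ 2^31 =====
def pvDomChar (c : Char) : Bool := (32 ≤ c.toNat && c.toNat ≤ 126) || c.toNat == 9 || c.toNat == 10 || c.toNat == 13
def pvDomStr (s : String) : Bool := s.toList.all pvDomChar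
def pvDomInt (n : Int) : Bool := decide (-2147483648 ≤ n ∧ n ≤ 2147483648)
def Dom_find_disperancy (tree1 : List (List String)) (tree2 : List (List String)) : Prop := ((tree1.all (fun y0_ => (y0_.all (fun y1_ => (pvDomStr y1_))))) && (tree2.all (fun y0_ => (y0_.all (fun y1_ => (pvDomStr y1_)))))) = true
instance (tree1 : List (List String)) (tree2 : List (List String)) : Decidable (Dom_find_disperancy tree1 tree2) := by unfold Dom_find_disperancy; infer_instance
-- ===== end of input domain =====

-- B replaces A's deque level-order BFS with a recursive depth-first traversal from the root
-- (objective: alternative, same cost). Both A and B reverse the two argument lists in place;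
-- the equivalence proved here is about the return value (the mutation is identical anyway).


-- ===== PORT A =====
-- tree[level][index]; out-of-range (an IndexError in Python) yields "" — such accesses are excluded by Pre_
def pvCell (t : List (List String)) (l i : Int) : String :=
  ((PySem.List.pyGet? t l).bind (fun row => PySem.List.pyGet? row i)).getD ""

-- the 'while q:' loop; fuel (= number of levels, enough under Pre_) only makes it total
def pvBfsLoop (t1 t2 : List (List String)) : Nat → List (Int × Int) → List (Int × Int)
  | 0, _ => []
  | fuel+1, q =>
    if q = [] then q
    else
      -- 'level' after the for-loop = first component of the last popped element
      let level : Int := ((q.getLast?).map Prod.fst).getD 0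
      -- pop all l elements, appending both children of each differing node
      let next := q.foldl (fun acc p =>
        if pvCell t1 p.1 p.2 ≠ pvCell t2 p.1 p.2 then
          acc ++ [(p.1 + 1, p.2 * 2), (p.1 + 1, p.2 * 2 + 1)]
        else acc) []
      if level + 1 = (t1.length : Int) - 1 then next
      else pvBfsLoop t1 t2 fuel next

def find_disperancy (tree1 : List (List String)) (tree2 : List (List String)) : List (Int × Int) :=
  let t1 := tree1.reverse
  let t2 := tree2.reverse
  let q := pvBfsLoop t1 t2 t1.length [((0 : Int), (0 : Int))]
  q.foldl (fun acc p => if pvCell t1 p.1 p.2 ≠ pvCell t2 p.1 p.2 then acc ++ [p] else acc) []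

-- ===== PORT B =====
-- recursive DFS of Source B; fuel (= number of levels, enough under Pre_) only makes it total
def pvDfs (t1 t2 : List (List String)) (n : Int) : Nat → Int → Int → List (Int × Int)
  | 0, _, _ => []
  | fuel+1, l, i =>
    if pvCell t1 l i ≠ pvCell t2 l i then
      if l + 2 = n then
        (if pvCell t1 (l+1) (i*2) ≠ pvCell t2 (l+1) (i*2) then [(l+1, i*2)] else []) ++
        (if pvCell t1 (l+1) (i*2+1) ≠ pvCell t2 (l+1) (i*2+1) then [(l+1, i*2+1)] else [])
      else pvDfs t1 t2 n fuel (l+1) (i*2) ++ pvDfs t1 t2 n fuel (l+1) (i*2+1)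
    else []

def find_disperancy_alt (tree1 : List (List String)) (tree2 : List (List String)) : List (Int × Int) :=
  let t1 := tree1.reverse
  let t2 := tree2.reverse
  pvDfs t1 t2 (t1.length : Int) t1.length 0 0

-- ===== PRECONDITION & SPEC =====
-- Pre_ admits pairs whose root hashes exist and compare equal (the BFS stops at once) and
-- pairs of complete-binary-tree shape of equal depth >= 2; it excludes the remaining ragged or
-- too-shallow trees, on which the traversal can hit an IndexError in Python (on a few of those
-- A still happens to return because every difference is pruned before a short row is reached).
def Pre_find_disperancy (tree1 : List (List String)) (tree2 : List (List String)) : Prop :=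
  (tree1 ≠ [] ∧ tree2 ≠ [] ∧
    ((tree1.reverse).getD 0 []) ≠ [] ∧ ((tree2.reverse).getD 0 []) ≠ [] ∧
    ((tree1.reverse).getD 0 []).getD 0 "" = ((tree2.reverse).getD 0 []).getD 0 "") ∨
  (tree1.length = tree2.length ∧ 2 ≤ tree1.length ∧
    (∀ i, i < tree1.length →
      2 ^ i ≤ ((tree1.reverse).getD i []).length ∧ 2 ^ i ≤ ((tree2.reverse).getD i []).length))
instance (tree1 : List (List String)) (tree2 : List (List String)) : Decidable (Pre_find_disperancy tree1 tree2) := by unfold Pre_find_disperancy; infer_instance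

def pvWitness_find_disperancy : List (List String) × List (List String) :=
  ([["a", "b"], ["r"]], [["a", "c"], ["s"]])

def Spec_find_disperancy (tree1 : List (List String)) (tree2 : List (List String)) (out : List (Int × Int)) : Prop := out = find_disperancy_alt tree1 tree2
instance (tree1 : List (List String)) (tree2 : List (List String)) (out : List (Int × Int)) : Decidable (Spec_find_disperancy tree1 tree2 out) := by unfold Spec_find_disperancy; infer_instance

-- ===== CLAIM (what is proved, stated in full; the proofs are below) =====
def Claim_equal_find_disperancy : Prop := ∀ (tree1 : List (List String)) (tree2 : List (List String)), Dom_find_disperancy tree1 tree2 → Pre_find_disperancy tree1 tree2 → Spec_find_disperancy tree1 tree2 (find_disperancy tree1 tree2)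

-- ===== LEMMAS AND PROOFS =====

theorem pv_flatMap_congr_mem {α β : Type} {l : List α} {f g : α → List β}
    (h : ∀ x ∈ l, f x = g x) : l.flatMap f = l.flatMap g := by
  induction l with
  | nil => rfl
  | cons a t ih =>
    simp only [List.flatMap_cons, h a (by simp), ih (fun x hx => h x (by simp [hx]))]

theorem pv_filter_flatMap {α β : Type} (l : List α) (f : α → List β) (p : β → Bool) :
    (l.flatMap f).filter p = l.flatMap (fun x => (f x).filter p) := by
  induction l with
  | nil => rfl
  | cons a t ih => simp [List.flatMap_cons, List.filter_append, ih]

theorem pv_getLast_fst {l : Int} (q : List (Int × Int)) (hne : q ≠ [])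
    (hinv : ∀ p ∈ q, p.1 = l) : ((q.getLast?).map Prod.fst).getD 0 = l := by
  rw [List.getLast?_eq_some_getLast hne]
  simp [hinv (q.getLast hne) (List.getLast_mem hne)]

-- the appended-children fold equals a flatMap, with the popped level rewritten to l
theorem pv_next_flatMap (t1 t2 : List (List String)) {l : Int} (q : List (Int × Int))
    (hinv : ∀ p ∈ q, p.1 = l) :
    q.foldl (fun acc p =>
        if pvCell t1 p.1 p.2 ≠ pvCell t2 p.1 p.2 then
          acc ++ [(p.1 + 1, p.2 * 2), (p.1 + 1, p.2 * 2 + 1)]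
        else acc) []
      = q.flatMap (fun p =>
          if pvCell t1 p.1 p.2 ≠ pvCell t2 p.1 p.2 then
            [(l + 1, p.2 * 2), (l + 1, p.2 * 2 + 1)]
          else []) := by
  have h1 := PySem.List.foldl_congr_mem (l := q) (init := ([] : List (Int × Int)))
    (f := fun acc p =>
      if pvCell t1 p.1 p.2 ≠ pvCell t2 p.1 p.2 then
        acc ++ [(p.1 + 1, p.2 * 2), (p.1 + 1, p.2 * 2 + 1)]
      else acc)
    (g := fun acc p => acc ++
      (if pvCell t1 p.1 p.2 ≠ pvCell t2 p.1 p.2 then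
        [(l + 1, p.2 * 2), (l + 1, p.2 * 2 + 1)] else []))
    (by intro acc p hp; dsimp only; rw [hinv p hp]; split <;> simp)
  rw [h1, PySem.List.foldl_append_eq_flatMap]
  simp

-- at the boundary level (children are leaves) the filtered children equal the DFS leaf output
theorem pv_leaf (t1 t2 : List (List String)) {l : Int} (hn : l + 2 = (t1.length : Int))
    (fuel : Nat) (q : List (Int × Int)) (hinv : ∀ p ∈ q, p.1 = l) :
    (q.flatMap (fun p =>
        if pvCell t1 p.1 p.2 ≠ pvCell t2 p.1 p.2 then
          [(l + 1, p.2 * 2), (l + 1, p.2 * 2 + 1)]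
        else [])).filter (fun p => decide (pvCell t1 p.1 p.2 ≠ pvCell t2 p.1 p.2))
      = q.flatMap (fun p => pvDfs t1 t2 (t1.length : Int) (fuel+1) p.1 p.2) := by
  rw [pv_filter_flatMap]
  apply pv_flatMap_congr_mem
  intro p hp
  rw [hinv p hp]
  simp only [pvDfs, if_pos hn]
  split
  · simp only [List.filter]
    split_ifs with h1 h2 <;> simp_all
  · simp [List.filter]

theorem pv_next_inv (t1 t2 : List (List String)) {l : Int} (q : List (Int × Int)) :
    ∀ p ∈ (q.flatMap (fun p =>
        if pvCell t1 p.1 p.2 ≠ pvCell t2 p.1 p.2 then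
          [(l + 1, p.2 * 2), (l + 1, p.2 * 2 + 1)]
        else [])), p.1 = l + 1 := by
  intro p hp
  simp only [List.mem_flatMap] at hp
  obtain ⟨x, _, hmem⟩ := hp
  split at hmem <;> simp at hmem
  rcases hmem with h | h <;> simp [h]

-- one unfolding of the loop on a nonempty queue whose entries all sit at level l
theorem pv_bfs_step (t1 t2 : List (List String)) (fuel : Nat) {l : Int}
    (q : List (Int × Int)) (hq : q ≠ []) (hinv : ∀ p ∈ q, p.1 = l) :
    pvBfsLoop t1 t2 (fuel+1) q =
      (if l + 1 = (t1.length : Int) - 1 then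
        q.flatMap (fun p =>
          if pvCell t1 p.1 p.2 ≠ pvCell t2 p.1 p.2 then
            [(l + 1, p.2 * 2), (l + 1, p.2 * 2 + 1)]
          else [])
      else pvBfsLoop t1 t2 fuel (q.flatMap (fun p =>
          if pvCell t1 p.1 p.2 ≠ pvCell t2 p.1 p.2 then
            [(l + 1, p.2 * 2), (l + 1, p.2 * 2 + 1)]
          else []))) := by
  conv_lhs => rw [pvBfsLoop]
  simp only [if_neg hq]
  rw [pv_getLast_fst q hq hinv, pv_next_flatMap t1 t2 q hinv]

-- the heart: the BFS loop, filtered at the end, equals the DFS glued over the queue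
theorem pv_main (t1 t2 : List (List String)) :
    ∀ (fuel : Nat) (l : Int) (q : List (Int × Int)), (∀ p ∈ q, p.1 = l) →
      (pvBfsLoop t1 t2 (fuel+1) q).filter
          (fun p => decide (pvCell t1 p.1 p.2 ≠ pvCell t2 p.1 p.2))
        = q.flatMap (fun p => pvDfs t1 t2 (t1.length : Int) (fuel+1) p.1 p.2) := by
  intro fuel
  induction fuel with
  | zero =>
    intro l q hinv
    by_cases hq : q = []
    · subst hq; simp [pvBfsLoop]
    · rw [pv_bfs_step t1 t2 0 q hq hinv]
      by_cases hlast : l + 1 = (t1.length : Int) - 1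
      · rw [if_pos hlast, pv_leaf t1 t2 (by omega) 0 q hinv]
      · rw [if_neg hlast]
        simp only [pvBfsLoop, List.filter_nil]
        have hn : ¬ (l + 2 = (t1.length : Int)) := by omega
        rw [pv_flatMap_congr_mem (g := fun _ => ([] : List (Int × Int)))
            (by intro p hp; rw [hinv p hp]; simp only [pvDfs, if_neg hn]; split <;> simp)]
        simp
  | succ f ih =>
    intro l q hinv
    by_cases hq : q = []
    · subst hq; simp [pvBfsLoop]
    · rw [pv_bfs_step t1 t2 (f+1) q hq hinv]
      by_cases hlast : l + 1 = (t1.length : Int) - 1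
      · rw [if_pos hlast, pv_leaf t1 t2 (by omega) (f+1) q hinv]
      · rw [if_neg hlast]
        rw [ih (l+1) _ (pv_next_inv t1 t2 q)]
        rw [List.flatMap_assoc]
        apply pv_flatMap_congr_mem
        intro p hp
        rw [hinv p hp]
        have hn : ¬ (l + 2 = (t1.length : Int)) := by omega
        simp only [pvDfs, if_neg hn]
        split <;> simp

-- ===== VERDICT (by name: the statement is the Claim_ definition above) =====
theorem find_disperancy_spec : Claim_equal_find_disperancy := by
  intro tree1 tree2 _ hpre
  have hlen1 : 1 ≤ tree1.length := by
    rcases hpre with ⟨h1, _⟩ | ⟨_, h2, _⟩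
    · exact List.length_pos_iff.mpr h1
    · omega
  unfold Spec_find_disperancy find_disperancy find_disperancy_alt
  simp only []
  rw [PySem.List.foldl_append_ite_eq_filter]
  obtain ⟨k, hk⟩ : ∃ k, tree1.reverse.length = k + 1 := by
    refine ⟨tree1.reverse.length - 1, ?_⟩
    simp only [List.length_reverse]; omega
  -- hlen1 justifies the successor decomposition
  rw [hk, pv_main tree1.reverse tree2.reverse k 0 [((0 : Int), (0 : Int))] (by simp)]
  simp [← hk]
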